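-- pv_equiv track=rewrite | github.com/ChuanleiGuo/AlgorithmsPlayground | LeetCodeSolutions/python/214_Shortest_Palindrome.py | __get_common_length
-- ===== SOURCE A (Python) =====
-- def __get_common_length(s):
--     rev = s[::-1]
--     builder = s + '#' + rev
--     p = [0] * len(builder)
--     for i in range(1, len(p)):
--         j = p[i - 1]
--         while j > 0 and builder[i] != builder[j]:
--             j = p[j - 1]
--         if j == 0:
--             p[i] = 1 if builder[i] == builder[0] else 0
--         else:
--             p[i] = j + 1
--     return p[-1]
-- ===== SOURCE B (Python) =====
-- def __get_common_length(s):
--     builder = s + '#' + s[::-1]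
--     n = len(builder)
--     z = [0] * n
--     l = r = 0
--     for i in range(1, n):
--         zi = min(r - i, z[i - l]) if i < r else 0
--         while i + zi < n and builder[zi] == builder[i + zi]:
--             zi += 1
--         z[i] = zi
--         if i + zi > r:
--             l, r = i, i + zi
--     for i in range(1, n):
--         if i + z[i] == n:
--             return n - i
--     return 0
-- ===== Notes on version B (the rewrite author's own statement) =====
-- stated objective: alternative
-- what changed: Replaces the KMP prefix-function DP (fallback chain j = p[j-1]) with the Z-function computed by the sliding-window [l,r] algorithm over the same builder string (s, then the hash separator, then reversed s), returning n - i for the smallest i >= 1 whose Z-box reaches the end of the builder (the longest proper border), or 0.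
import Mathlib
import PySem

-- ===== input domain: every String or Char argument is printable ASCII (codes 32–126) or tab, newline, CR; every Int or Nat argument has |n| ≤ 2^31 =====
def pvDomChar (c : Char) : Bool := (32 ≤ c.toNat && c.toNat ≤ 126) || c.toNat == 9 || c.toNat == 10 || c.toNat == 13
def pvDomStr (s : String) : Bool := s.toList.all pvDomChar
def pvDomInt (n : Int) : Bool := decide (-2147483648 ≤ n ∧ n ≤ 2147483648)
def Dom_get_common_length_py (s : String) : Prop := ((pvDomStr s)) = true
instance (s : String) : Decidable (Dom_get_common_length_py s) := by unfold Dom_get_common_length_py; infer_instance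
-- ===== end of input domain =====

-- B replaces the KMP prefix-function DP with the sliding-window Z-function over the
-- same builder s + '#' + s[::-1], reading the longest proper border off the Z-array
-- (alternative algorithm of the same O(n) cost).

-- ===== PORT A =====
-- `while j > 0 and builder[i] != builder[j]: j = p[j-1]`; fuel = initial j suffices
-- because every step strictly decreases j (entries satisfy p[k] ≤ k, proved below).
-- All string indexing in the Python is in range, so getD is exact there.
def pvChase (t : List Char) (p : List Nat) (c : Char) : Nat → Nat → Nat
  | 0, j => j
  | f + 1, j =>
    if j ≠ 0 ∧ t.getD j ' ' ≠ c then pvChase t p c f (p.getD (j - 1) 0) else j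

-- `for i in range(1, len(p))`; Python writes p[i] exactly once, left to right, so the
-- preallocated zero array is modelled by appending each computed entry in order.
def pvKmpLoop (t : List Char) : Nat → List Nat → List Nat
  | 0, p => p
  | m + 1, p =>
    pvKmpLoop t m (p ++ [let i := p.length;
      let j0 := p.getD (i - 1) 0;
      let j := pvChase t p (t.getD i ' ') j0 j0;
      if j = 0 then (if t.getD i ' ' = t.getD 0 ' ' then 1 else 0) else j + 1])

def get_common_length_py (s : String) : Int :=
  let t := s.toList ++ ['#'] ++ s.toList.reverse   -- builder = s + '#' + s[::-1]
  let p := pvKmpLoop t (t.length - 1) [0]          -- p = [0]*len(builder); the for-loop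
  (p.getD (p.length - 1) 0 : Int)                  -- p[-1] (p is nonempty)

-- ===== PORT B =====
-- `while i + zi < n and builder[zi] == builder[i + zi]: zi += 1`; fuel = n suffices
-- since each step needs i + zi < n and increments zi.
def pvZWhile (t : List Char) (i : Nat) : Nat → Nat → Nat
  | 0, z => z
  | f + 1, z =>
    if i + z < t.length ∧ t.getD z ' ' = t.getD (i + z) ' ' then pvZWhile t i f (z + 1)
    else z

-- `for i in range(1, n)` building z and maintaining the window (l, r); z[i] is written
-- exactly once, left to right, so the preallocated zero array is modelled by appending.
def pvZLoop (t : List Char) : Nat → Nat × Nat × List Nat → Nat × Nat × List Nat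
  | 0, st => st
  | m + 1, (l, r, zs) =>
    pvZLoop t m
      (let i := zs.length
       let z0 := if i < r then min (r - i) (zs.getD (i - l) 0) else 0
       let z := pvZWhile t i t.length z0
       if i + z > r then (i, i + z, zs ++ [z]) else (l, r, zs ++ [z]))

-- `for i in range(1, n): if i + z[i] == n: return n - i` ; `return 0`
def pvZFind (zs : List Nat) (n : Nat) : Nat → Nat → Nat
  | 0, _ => 0
  | m + 1, i => if i + zs.getD i 0 = n then n - i else pvZFind zs n m (i + 1)

def get_common_length_py_alt (s : String) : Int :=
  let t := s.toList ++ ['#'] ++ s.toList.reverse   -- builder = s + '#' + s[::-1]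
  let st := pvZLoop t (t.length - 1) (0, 0, [0])   -- z = [0]*n; l = r = 0; first for-loop
  (pvZFind st.2.2 t.length (t.length - 1) 1 : Int) -- second for-loop

-- ===== PRECONDITION & SPEC =====
def Spec_get_common_length_py (s : String) (out : Int) : Prop := out = get_common_length_py_alt s
instance (s : String) (out : Int) : Decidable (Spec_get_common_length_py s out) := by unfold Spec_get_common_length_py; infer_instance

-- ===== CLAIM (what is proved, stated in full; the proofs are below) =====
def Claim_equal_get_common_length_py : Prop := ∀ (s : String), Dom_get_common_length_py s → Spec_get_common_length_py s (get_common_length_py s)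

-- ===== LEMMAS AND PROOFS =====

-- k is a border of t: the length-k prefix equals the length-k suffix.
def IsB (t : List Char) (k : Nat) : Prop := k ≤ t.length ∧ t.take k = t.drop (t.length - k)

theorem isB_zero (t : List Char) : IsB t 0 := ⟨Nat.zero_le _, by simp⟩

-- borders are nested: a smaller border is a border of a larger one
theorem isB_of_le (t : List Char) (k j : Nat) (hk : IsB t k) (hj : IsB t j) (hkj : k ≤ j) :
    IsB (t.take j) k := by
  obtain ⟨hk1, hk2⟩ := hk
  obtain ⟨hj1, hj2⟩ := hj
  refine ⟨by simpa [List.length_take, Nat.min_eq_left hj1] using hkj, ?_⟩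
  have h1 : (t.take j).take k = t.take k := by
    rw [List.take_take, Nat.min_eq_left hkj]
  have hlen : (t.take j).length = j := by simp [Nat.min_eq_left hj1]
  rw [h1, hlen, hj2, List.drop_drop, hk2]
  congr 1
  omega

-- a border of a border is a border
theorem isB_trans (t : List Char) (j b : Nat) (hj : IsB t j) (hb : IsB (t.take j) b) :
    IsB t b := by
  obtain ⟨hj1, hj2⟩ := hj
  obtain ⟨hb1, hb2⟩ := hb
  have hlen : (t.take j).length = j := by simp [Nat.min_eq_left hj1]
  rw [hlen] at hb1
  refine ⟨le_trans hb1 hj1, ?_⟩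
  have h1 : (t.take j).take b = t.take b := by
    rw [List.take_take, Nat.min_eq_left hb1]
  rw [h1, hlen] at hb2
  rw [hb2, hj2, List.drop_drop]
  congr 1
  omega

theorem take_succ_getD (t : List Char) (k : Nat) (hk : k < t.length) (d : Char) :
    t.take (k + 1) = t.take k ++ [t.getD k d] := by
  rw [List.take_add_one, List.getElem?_eq_getElem hk]
  simp [List.getD, List.getElem?_eq_getElem hk]

-- extension: k+1 is a border of w ++ [c] iff k is a border of w and w[k] = c  (k < |w|)
theorem isB_snoc (w : List Char) (c : Char) (k : Nat) (hk : k < w.length) (d : Char) :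
    IsB (w ++ [c]) (k + 1) ↔ (IsB w k ∧ w.getD k d = c) := by
  have hlen : (w ++ [c]).length = w.length + 1 := by simp
  have htake : (w ++ [c]).take (k + 1) = w.take k ++ [w.getD k d] := by
    rw [List.take_append_of_le_length (by omega), take_succ_getD w k hk d]
  have hdrop : (w ++ [c]).drop ((w ++ [c]).length - (k + 1)) = w.drop (w.length - k) ++ [c] := by
    rw [hlen, show w.length + 1 - (k + 1) = w.length - k by omega,
      List.drop_append_of_le_length (by omega)]
  constructor
  · rintro ⟨-, h2⟩
    rw [htake, hdrop] at h2
    have := (List.concat_inj (l := w.take k) (l' := w.drop (w.length - k))).mp (by simpa [List.concat_eq_append] using h2)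
    exact ⟨⟨le_of_lt hk, this.1⟩, this.2⟩
  · rintro ⟨⟨-, h1⟩, h2⟩
    refine ⟨by omega, ?_⟩
    rw [htake, hdrop, h1, h2]

theorem getD_take (t : List Char) (i k : Nat) (hk : k < i) (d : Char) :
    (t.take i).getD k d = t.getD k d := by
  simp [List.getD, hk]

theorem getD_append_left (p : List Nat) (v : Nat) (k : Nat) (hk : k < p.length) :
    (p ++ [v]).getD k 0 = p.getD k 0 := by
  simp [List.getD, List.getElem?_append_left hk]

-- correctness of the computed prefix of p: each entry is the longest proper border
def Good (t : List Char) (p : List Nat) : Prop :=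
  ∀ i, i < p.length →
    IsB (t.take (i + 1)) (p.getD i 0) ∧ p.getD i 0 ≤ i ∧
      (∀ m, m ≤ i → IsB (t.take (i + 1)) m → m ≤ p.getD i 0)

theorem good_init (t : List Char) : Good t [0] := by
  intro i hi
  have h0 : i = 0 := by simp at hi; omega
  subst h0
  exact ⟨isB_zero _, le_refl _, fun m hm _ => hm⟩

-- the while-loop: starting from a border j of w := take p.length t dominating all matching
-- borders, pvChase returns a border that exits the loop and still dominates them.
theorem chase_spec (t : List Char) (p : List Nat) (c : Char) (hg : Good t p) :
    ∀ f j, j ≤ f → j < p.length → IsB (t.take p.length) j →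
      (∀ m, m < p.length → IsB (t.take p.length) m → t.getD m ' ' = c → m ≤ j) →
      (IsB (t.take p.length) (pvChase t p c f j) ∧ pvChase t p c f j < p.length ∧
        (pvChase t p c f j = 0 ∨ t.getD (pvChase t p c f j) ' ' = c) ∧
        (∀ m, m < p.length → IsB (t.take p.length) m → t.getD m ' ' = c →
          m ≤ pvChase t p c f j)) := by
  intro f
  induction f with
  | zero =>
    intro j hjf hjlt hjB hinv
    have hj0 : j = 0 := Nat.le_zero.mp hjf
    subst hj0
    exact ⟨hjB, hjlt, Or.inl rfl, hinv⟩
  | succ f ih =>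
    intro j hjf hjlt hjB hinv
    have heq : pvChase t p c (f + 1) j =
        if j ≠ 0 ∧ t.getD j ' ' ≠ c then pvChase t p c f (p.getD (j - 1) 0) else j := rfl
    by_cases hcond : j ≠ 0 ∧ t.getD j ' ' ≠ c
    · rw [heq, if_pos hcond]
      obtain ⟨hj0, hjm⟩ := hcond
      have hj1 : j - 1 < p.length := by omega
      obtain ⟨hB', hle', hmax'⟩ := hg (j - 1) hj1
      rw [show j - 1 + 1 = j by omega] at hB' hmax'
      have htt : (t.take p.length).take j = t.take j := by
        rw [List.take_take, Nat.min_eq_left (le_of_lt hjlt)]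
      have hB'' : IsB (t.take p.length) (p.getD (j - 1) 0) :=
        isB_trans _ j _ hjB (by rw [htt]; exact hB')
      refine ih (p.getD (j - 1) 0) (by omega) (by omega) hB'' ?_
      intro m hm hmB hmc
      have hmj : m ≤ j := hinv m hm hmB hmc
      have hmlt : m < j := lt_of_le_of_ne hmj (by rintro rfl; exact hjm hmc)
      have : IsB (t.take j) m := by
        rw [← htt]; exact isB_of_le _ m j hmB hjB hmj
      exact hmax' m (by omega) this
    · rw [heq, if_neg hcond]
      refine ⟨hjB, hjlt, ?_, hinv⟩
      by_cases h0 : j = 0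
      · exact Or.inl h0
      · exact Or.inr (by by_contra hc; exact hcond ⟨h0, hc⟩)

-- one iteration of the for-loop preserves Good
theorem good_step (t : List Char) (p : List Nat) (hg : Good t p) (h1 : 1 ≤ p.length)
    (h2 : p.length < t.length) :
    Good t (p ++ [let i := p.length;
      let j0 := p.getD (i - 1) 0;
      let j := pvChase t p (t.getD i ' ') j0 j0;
      if j = 0 then (if t.getD i ' ' = t.getD 0 ' ' then 1 else 0) else j + 1]) := by
  simp only
  set i := p.length with hi
  set c := t.getD i ' ' with hc
  set j0 := p.getD (i - 1) 0 with hj0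
  set r := pvChase t p c j0 j0 with hr
  set v := (if r = 0 then (if c = t.getD 0 ' ' then 1 else 0) else r + 1) with hv
  intro k hk
  rw [List.length_append, List.length_singleton] at hk
  rcases Nat.lt_or_ge k p.length with hklt | hkge
  · rw [getD_append_left p v k hklt]
    exact hg k hklt
  · have hkeq : k = i := by omega
    subst hkeq
    have hgetv : (p ++ [v]).getD i 0 = v := by
      simp [List.getD, hi]
    rw [hgetv]
    -- facts about j0
    obtain ⟨hB0, hle0, hmax0⟩ := hg (i - 1) (by omega)
    rw [show i - 1 + 1 = i by omega] at hB0 hmax0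
    have hB0' : IsB (t.take i) j0 := hB0
    -- chase spec
    obtain ⟨hrB, hrlt, hrexit, hrmax⟩ :=
      chase_spec t p c hg j0 j0 (le_refl _) (by omega) hB0'
        (fun m hm hmB _ => hmax0 m (by omega) hmB)
    -- prefix of length i+1 as a snoc
    have hu : t.take (i + 1) = t.take i ++ [c] := take_succ_getD t i h2 ' '
    have hwlen : (t.take i).length = i := by
      simp [Nat.min_eq_left (le_of_lt h2)]
    have hsnoc : ∀ m, m < i →
        (IsB (t.take (i + 1)) (m + 1) ↔ (IsB (t.take i) m ∧ t.getD m ' ' = c)) := by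
      intro m hm
      rw [hu, isB_snoc (t.take i) c m (by omega) ' ', getD_take t i m hm ' ']
    by_cases hr0 : r = 0
    · by_cases hmatch : c = t.getD 0 ' '
      · have hveq : v = 1 := by rw [hv, if_pos hr0, if_pos hmatch]
        rw [hveq]
        refine ⟨?_, by omega, ?_⟩
        · exact (hsnoc 0 (by omega)).mpr ⟨isB_zero _, hmatch.symm⟩
        · intro m hm hmB
          match m with
          | 0 => omega
          | Nat.succ n =>
            have := (hsnoc n (by omega)).mp hmB
            have := hrmax n (by omega) this.1 this.2
            omega
      · have hveq : v = 0 := by rw [hv, if_pos hr0, if_neg hmatch]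
        rw [hveq]
        refine ⟨isB_zero _, by omega, ?_⟩
        intro m hm hmB
        match m with
        | 0 => omega
        | Nat.succ n =>
          have hn := (hsnoc n (by omega)).mp hmB
          have := hrmax n (by omega) hn.1 hn.2
          have hn0 : n = 0 := by omega
          subst hn0
          exact absurd hn.2.symm hmatch
    · have hveq : v = r + 1 := by rw [hv, if_neg hr0]
      have hmc : t.getD r ' ' = c := by
        rcases hrexit with h | h
        · exact absurd h hr0
        · exact h
      rw [hveq]
      refine ⟨(hsnoc r hrlt).mpr ⟨hrB, hmc⟩, by omega, ?_⟩
      intro m hm hmB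
      match m with
      | 0 => omega
      | Nat.succ n =>
        have hn := (hsnoc n (by omega)).mp hmB
        have := hrmax n (by omega) hn.1 hn.2
        omega

theorem loop_good (t : List Char) :
    ∀ m p, Good t p → 1 ≤ p.length → p.length + m ≤ t.length →
      Good t (pvKmpLoop t m p) ∧ (pvKmpLoop t m p).length = p.length + m := by
  intro m
  induction m with
  | zero => intro p hg h1 h2; exact ⟨hg, by simp [pvKmpLoop]⟩
  | succ m ih =>
    intro p hg h1 h2
    rw [show pvKmpLoop t (m + 1) p = pvKmpLoop t m (p ++ [let i := p.length;
      let j0 := p.getD (i - 1) 0;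
      let j := pvChase t p (t.getD i ' ') j0 j0;
      if j = 0 then (if t.getD i ' ' = t.getD 0 ' ' then 1 else 0) else j + 1]) from rfl]
    have hgs := good_step t p hg h1 (by omega)
    have := ih _ hgs (by simp only [List.length_append, List.length_singleton]; omega)
      (by simp only [List.length_append, List.length_singleton]; omega)
    refine ⟨this.1, ?_⟩
    rw [this.2]
    simp only [List.length_append, List.length_singleton]
    omega

-- ===== B-side lemmas: the Z-function =====

-- Match t i k: the first k characters of t agree with the k characters starting at i
def Match (t : List Char) (i k : Nat) : Prop :=
  i + k ≤ t.length ∧ ∀ a, a < k → t.getD a ' ' = t.getD (i + a) ' '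

def ZGood (t : List Char) (i z : Nat) : Prop :=
  Match t i z ∧ ∀ m, Match t i m → m ≤ z

theorem match_mono (t : List Char) (i k j : Nat) (h : Match t i k) (hj : j ≤ k) :
    Match t i j :=
  ⟨by have := h.1; omega, fun a ha => h.2 a (by omega)⟩

theorem getD_eq_getElem (t : List Char) (a : Nat) (h : a < t.length) (d : Char) :
    t.getD a d = t[a] := by
  simp [List.getD, List.getElem?_eq_getElem h]

-- IsB in character form
theorem isB_iff_match (t : List Char) (k : Nat) (hk : k ≤ t.length) :
    IsB t k ↔ Match t (t.length - k) k := by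
  constructor
  · rintro ⟨-, h⟩
    refine ⟨by omega, ?_⟩
    intro a ha
    have h1 : (t.take k).getD a ' ' = t.getD a ' ' := getD_take t k a ha ' '
    have h2 : (t.drop (t.length - k)).getD a ' ' = t.getD (t.length - k + a) ' ' := by
      simp [List.getD, List.getElem?_drop]
    rw [← h1, h, h2]
  · rintro ⟨h1, h2⟩
    refine ⟨hk, ?_⟩
    apply List.ext_getElem
    · simp
      omega
    · intro a h3 h4
      have h3' := h3
      simp only [List.length_take] at h3'
      have ha : a < k := by omega
      have hmem := h2 a ha
      rw [getD_eq_getElem t a (by omega) ' ',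
        getD_eq_getElem t (t.length - k + a) (by omega) ' '] at hmem
      simp only [List.getElem_take, List.getElem_drop]
      exact hmem

-- the inner while-loop computes the maximal extension (the true Z-value)
theorem zwhile_spec (t : List Char) (i : Nat) :
    ∀ f z, Match t i z → t.length - (i + z) ≤ f → ZGood t i (pvZWhile t i f z) := by
  intro f
  induction f with
  | zero =>
    intro z hm hf
    have hiz : i + z = t.length := by have := hm.1; omega
    have h0 : pvZWhile t i 0 z = z := rfl
    rw [h0]
    exact ⟨hm, fun m hmm => by have := hmm.1; omega⟩
  | succ f ih =>
    intro z hm hf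
    have heq : pvZWhile t i (f + 1) z =
        if i + z < t.length ∧ t.getD z ' ' = t.getD (i + z) ' ' then pvZWhile t i f (z + 1)
        else z := rfl
    by_cases hc : i + z < t.length ∧ t.getD z ' ' = t.getD (i + z) ' '
    · rw [heq, if_pos hc]
      refine ih (z + 1) ⟨by omega, ?_⟩ (by omega)
      intro a ha
      rcases Nat.lt_or_ge a z with h | h
      · exact hm.2 a h
      · have : a = z := by omega
        subst this
        exact hc.2
    · rw [heq, if_neg hc]
      refine ⟨hm, ?_⟩
      intro m hmm
      by_contra hlt
      have hz1 : Match t i (z + 1) := match_mono t i m (z + 1) hmm (by omega)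
      exact hc ⟨by have := hz1.1; omega, hz1.2 z (by omega)⟩

-- loop invariant for the Z sliding window
def ZInv (t : List Char) (l r : Nat) (zs : List Nat) : Prop :=
  1 ≤ zs.length ∧ l < zs.length ∧ l ≤ r ∧ r ≤ t.length ∧ Match t l (r - l) ∧
    zs.getD 0 0 = 0 ∧ ∀ j, 1 ≤ j → j < zs.length → ZGood t j (zs.getD j 0)

-- the window seeding value is a valid partial match
theorem zinit_match (t : List Char) (l r : Nat) (zs : List Nat) (hinv : ZInv t l r zs)
    (hlen : zs.length < t.length) :
    Match t zs.length
      (if zs.length < r then min (r - zs.length) (zs.getD (zs.length - l) 0) else 0) := by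
  obtain ⟨h1, h2, h3, h4, hw, h0, hg⟩ := hinv
  by_cases hir : zs.length < r
  · rw [if_pos hir]
    refine ⟨by omega, ?_⟩
    intro a ha
    have hil : 1 ≤ zs.length - l := by omega
    have hstep : t.getD a ' ' = t.getD (zs.length - l + a) ' ' := by
      rcases Nat.lt_or_ge (zs.length - l) zs.length with hge | hge
      · exact (hg (zs.length - l) hil hge).1.2 a (by omega)
      · -- zs.length - l ≥ zs.length forces l = 0, index out of range, getD = 0, k = 0
        have hl0 : l = 0 := by omega
        subst hl0
        have : zs.getD (zs.length - 0) 0 = 0 := by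
          simp [List.getD]
        omega
    have hwin := hw.2 (zs.length - l + a) (by omega)
    rw [show l + (zs.length - l + a) = zs.length + a by omega] at hwin
    exact hstep.trans hwin
  · rw [if_neg hir]
    exact ⟨by omega, fun a ha => by omega⟩

-- one iteration of the Z for-loop preserves the invariant
theorem zstep (t : List Char) (l r : Nat) (zs : List Nat) (z : Nat) (hinv : ZInv t l r zs)
    (_hlen : zs.length < t.length) (hz : ZGood t zs.length z) :
    ZInv t (if zs.length + z > r then zs.length else l)
      (if zs.length + z > r then zs.length + z else r) (zs ++ [z]) := by
  obtain ⟨h1, h2, h3, h4, hw, h0, hg⟩ := hinv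
  obtain ⟨⟨hzb, hzc⟩, hzmax⟩ := hz
  have hlen' : (zs ++ [z]).length = zs.length + 1 := by simp
  have hgetz : (zs ++ [z]).getD zs.length 0 = z := by simp [List.getD]
  have hg' : ∀ j, 1 ≤ j → j < (zs ++ [z]).length → ZGood t j ((zs ++ [z]).getD j 0) := by
    intro j hj1 hj2
    rcases Nat.lt_or_ge j zs.length with hjlt | hjge
    · rw [getD_append_left zs z j hjlt]
      exact hg j hj1 hjlt
    · have hje : j = zs.length := by rw [hlen'] at hj2; omega
      subst hje
      rw [hgetz]
      exact ⟨⟨hzb, hzc⟩, hzmax⟩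
  have h0' : (zs ++ [z]).getD 0 0 = 0 := by
    rw [getD_append_left zs z 0 (by omega)]
    exact h0
  by_cases hgt : zs.length + z > r
  · rw [if_pos hgt, if_pos hgt]
    refine ⟨by omega, by omega, by omega, hzb, ?_, h0', hg'⟩
    rw [show zs.length + z - zs.length = z by omega]
    exact ⟨hzb, hzc⟩
  · rw [if_neg hgt, if_neg hgt]
    exact ⟨by omega, by omega, h3, h4, hw, h0', hg'⟩

theorem zloop_good (t : List Char) :
    ∀ m l r zs, ZInv t l r zs → zs.length + m ≤ t.length →
      (ZInv t (pvZLoop t m (l, r, zs)).1 (pvZLoop t m (l, r, zs)).2.1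
          (pvZLoop t m (l, r, zs)).2.2 ∧
        (pvZLoop t m (l, r, zs)).2.2.length = zs.length + m) := by
  intro m
  induction m with
  | zero => intro l r zs hinv _; exact ⟨hinv, by simp [pvZLoop]⟩
  | succ m ih =>
    intro l r zs hinv hlen
    have hlt : zs.length < t.length := by omega
    have hm0 := zinit_match t l r zs hinv hlt
    set z0 := (if zs.length < r then min (r - zs.length) (zs.getD (zs.length - l) 0) else 0)
      with hz0
    set z := pvZWhile t zs.length t.length z0 with hzdef
    have hz := zwhile_spec t zs.length t.length z0 hm0 (by have := hm0.1; omega)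
    have key := zstep t l r zs z hinv hlt hz
    have hstep : pvZLoop t (m + 1) (l, r, zs) =
        pvZLoop t m (if zs.length + z > r then (zs.length, zs.length + z, zs ++ [z])
          else (l, r, zs ++ [z])) := rfl
    rw [hstep]
    by_cases hgt : zs.length + z > r
    · rw [if_pos hgt]
      rw [if_pos hgt, if_pos hgt] at key
      have := ih zs.length (zs.length + z) (zs ++ [z]) key (by simp; omega)
      refine ⟨this.1, ?_⟩
      rw [this.2]
      simp only [List.length_append, List.length_singleton]
      omega
    · rw [if_neg hgt]
      rw [if_neg hgt, if_neg hgt] at key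
      have := ih l r (zs ++ [z]) key (by simp; omega)
      refine ⟨this.1, ?_⟩
      rw [this.2]
      simp only [List.length_append, List.length_singleton]
      omega

-- the final scan returns the longest proper border (smallest i whose Z-box reaches the end)
theorem zfind_spec (t : List Char) (zs : List Nat)
    (hgood : ∀ j, 1 ≤ j → j < t.length → ZGood t j (zs.getD j 0)) :
    ∀ m i, 1 ≤ i → i + m = t.length →
      ((∀ k, 1 ≤ k → k ≤ t.length - i → IsB t k → k ≤ pvZFind zs t.length m i) ∧
        (pvZFind zs t.length m i = 0 ∨
          (IsB t (pvZFind zs t.length m i) ∧ pvZFind zs t.length m i ≤ t.length - i))) := by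
  intro m
  induction m with
  | zero =>
    intro i hi1 hi2
    exact ⟨fun k hk1 hk2 _ => by omega, Or.inl rfl⟩
  | succ m ih =>
    intro i hi1 hi2
    have hilt : i < t.length := by omega
    obtain ⟨⟨hzb, hzc⟩, hzmax⟩ := hgood i hi1 hilt
    have heq : pvZFind zs t.length (m + 1) i =
        if i + zs.getD i 0 = t.length then t.length - i else pvZFind zs t.length m (i + 1) :=
      rfl
    by_cases hc : i + zs.getD i 0 = t.length
    · rw [heq, if_pos hc]
      constructor
      · intro k hk1 hk2 _
        omega
      · refine Or.inr ⟨?_, by omega⟩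
        have hzi : zs.getD i 0 = t.length - i := by omega
        rw [isB_iff_match t (t.length - i) (by omega),
          show t.length - (t.length - i) = i by omega]
        exact match_mono t i (zs.getD i 0) (t.length - i) ⟨hzb, hzc⟩ (by omega)
    · rw [heq, if_neg hc]
      have hnotb : ¬ IsB t (t.length - i) := by
        intro hB
        have hmm : Match t i (t.length - i) := by
          rw [isB_iff_match t (t.length - i) (by omega),
            show t.length - (t.length - i) = i by omega] at hB
          exact hB
        have := hzmax (t.length - i) hmm
        have := hzb
        omega
      obtain ⟨ihmax, ihcase⟩ := ih (i + 1) (by omega) (by omega)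
      constructor
      · intro k hk1 hk2 hkB
        have hkne : k ≠ t.length - i := fun h => hnotb (h ▸ hkB)
        exact ihmax k hk1 (by omega) hkB
      · rcases ihcase with h | ⟨hB, hle⟩
        · exact Or.inl h
        · exact Or.inr ⟨hB, by omega⟩

-- ===== VERDICT (by name: the statement is the Claim_ definition above) =====
theorem get_common_length_py_spec : Claim_equal_get_common_length_py := by
  intro s _
  unfold Spec_get_common_length_py
  simp only [get_common_length_py, get_common_length_py_alt]
  set t := s.toList ++ ['#'] ++ s.toList.reverse with ht
  have hn : 1 ≤ t.length := by simp [ht]; omega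
  -- A side: the last entry of p is the longest proper border of t
  obtain ⟨hgood, hlen⟩ := loop_good t (t.length - 1) [0] (good_init t) (by simp) (by simp; omega)
  set p := pvKmpLoop t (t.length - 1) [0] with hp
  have hplen : p.length = t.length := by rw [hlen]; simp; omega
  obtain ⟨haB, hale, hamax⟩ := hgood (t.length - 1) (by omega)
  rw [show t.length - 1 + 1 = t.length by omega, List.take_length] at haB hamax
  set a := p.getD (t.length - 1) 0 with ha
  -- B side: the Z scan returns the longest proper border of t
  have hinv0 : ZInv t 0 0 [0] := by
    refine ⟨by simp, by simp, le_refl 0, by omega, ⟨by omega, fun a ha => by omega⟩, rfl, ?_⟩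
    intro j hj1 hj2
    simp at hj2
    omega
  obtain ⟨hinv, hzslen⟩ := zloop_good t (t.length - 1) 0 0 [0] hinv0 (by simp; omega)
  set st := pvZLoop t (t.length - 1) (0, 0, [0]) with hst
  have hzl : st.2.2.length = t.length := by rw [hzslen]; simp; omega
  have hg : ∀ j, 1 ≤ j → j < t.length → ZGood t j (st.2.2.getD j 0) := by
    intro j hj1 hj2
    exact hinv.2.2.2.2.2.2 j hj1 (by omega)
  obtain ⟨hmaxB, hcase⟩ := zfind_spec t st.2.2 hg (t.length - 1) 1 (le_refl 1) (by omega)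
  set b := pvZFind st.2.2 t.length (t.length - 1) 1 with hb
  have hab1 : a ≤ b := by
    rcases Nat.eq_zero_or_pos a with h | h
    · omega
    · exact hmaxB a h (by omega) haB
  have hab2 : b ≤ a := by
    rcases hcase with h | ⟨hB, hle⟩
    · omega
    · exact hamax b (by omega) hB
  rw [hplen]
  exact congrArg Nat.cast (by omega : a = b)
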